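-- pv_equiv track=rewrite | github.com/ShivanshDubey1704/agentic-ai-assistant | planner.py | _decompose_goal
-- ===== SOURCE A (Python) =====
-- from typing import Dict, List, Any
--
-- def _decompose_goal(goal: str, tools: Dict[str, Any]) -> List[Dict[str, str]]:
--     """
--     Decompose a goal into steps.
--
--     Args:
--         goal: Goal to decompose
--         tools: Available tools
--
--     Returns:
--         List of steps
--     """
--     # Simple keyword-based decomposition
--     # In production, use LLM for intelligent decomposition
--
--     steps = []
--     goal_lower = goal.lower()
--
--     # Check for calculation needs
--     if any(op in goal_lower for op in ['calculate', 'compute', '+', '-', '*', '/', 'sum']):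
--         steps.append({
--             "action": "use_tool",
--             "tool": "calculator",
--             "description": "Perform calculation"
--         })
--
--     # Check for search needs
--     if any(word in goal_lower for word in ['search', 'find', 'look up', 'research']):
--         steps.append({
--             "action": "use_tool",
--             "tool": "web_search",
--             "description": "Search for information"
--         })
--
--     # Check for file operations
--     if 'read' in goal_lower and 'file' in goal_lower:
--         steps.append({
--             "action": "use_tool",
--             "tool": "file_read",
--             "description": "Read file contents"
--         })
--
--     if 'write' in goal_lower or 'save' in goal_lower:
--         steps.append({
--             "action": "use_tool",
--             "tool": "file_write",
--             "description": "Write to file"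
--         })
--
--     # Check for time/date needs
--     if any(word in goal_lower for word in ['time', 'date', 'when', 'current']):
--         steps.append({
--             "action": "use_tool",
--             "tool": "get_current_time",
--             "description": "Get current time"
--         })
--
--     # Check for weather
--     if 'weather' in goal_lower:
--         steps.append({
--             "action": "use_tool",
--             "tool": "weather",
--             "description": "Get weather information"
--         })
--
--     # If no specific steps identified, add a thinking step
--     if not steps:
--         steps.append({
--             "action": "think",
--             "description": "Analyze the goal and determine approach"
--         })
--
--     # Always add a final step to synthesize results
--     steps.append({
--         "action": "synthesize",
--         "description": "Combine results and provide final answer"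
--     })
--
--     return steps
-- ===== SOURCE B (Python) =====
-- # B: single left-to-right scan of the goal text against an inverted keyword->tag index
-- # (multi-pattern matching in one pass), then steps emitted by subset tests on the tag set —
-- # no per-rule substring search at all.
-- _KEYWORD_TAGS = [
--     ('calculate', 'calc'), ('compute', 'calc'), ('+', 'calc'), ('-', 'calc'),
--     ('*', 'calc'), ('/', 'calc'), ('sum', 'calc'),
--     ('search', 'search'), ('find', 'search'), ('look up', 'search'), ('research', 'search'),
--     ('read', 'read'), ('file', 'file'),
--     ('write', 'write'), ('save', 'write'),
--     ('time', 'time'), ('date', 'time'), ('when', 'time'), ('current', 'time'),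
--     ('weather', 'weather'),
-- ]
--
-- _TAG_STEPS = [
--     ({'calc'}, {"action": "use_tool", "tool": "calculator", "description": "Perform calculation"}),
--     ({'search'}, {"action": "use_tool", "tool": "web_search", "description": "Search for information"}),
--     ({'read', 'file'}, {"action": "use_tool", "tool": "file_read", "description": "Read file contents"}),
--     ({'write'}, {"action": "use_tool", "tool": "file_write", "description": "Write to file"}),
--     ({'time'}, {"action": "use_tool", "tool": "get_current_time", "description": "Get current time"}),
--     ({'weather'}, {"action": "use_tool", "tool": "weather", "description": "Get weather information"}),
-- ]
--
--
-- def _decompose_goal(goal, tools):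
--     gl = goal.lower()
--     tags = set()
--     for i in range(len(gl)):
--         for kw, tag in _KEYWORD_TAGS:
--             if gl.startswith(kw, i):
--                 tags.add(tag)
--
--     steps = [dict(step) for required, step in _TAG_STEPS if required <= tags]
--     if not steps:
--         steps.append({"action": "think",
--                       "description": "Analyze the goal and determine approach"})
--     steps.append({"action": "synthesize",
--                   "description": "Combine results and provide final answer"})
--     return steps
-- ===== Notes on version B (the rewrite author's own statement) =====
-- stated objective: alternative
-- what changed: Instead of running seven independent substring searches (one per rule), B makes a single left-to-right scan of the lowered goal against an inverted keyword-to-tag index, collecting a set of matched tags, and then emits steps by subset tests of each rule's required tags against that set.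
import Mathlib
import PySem

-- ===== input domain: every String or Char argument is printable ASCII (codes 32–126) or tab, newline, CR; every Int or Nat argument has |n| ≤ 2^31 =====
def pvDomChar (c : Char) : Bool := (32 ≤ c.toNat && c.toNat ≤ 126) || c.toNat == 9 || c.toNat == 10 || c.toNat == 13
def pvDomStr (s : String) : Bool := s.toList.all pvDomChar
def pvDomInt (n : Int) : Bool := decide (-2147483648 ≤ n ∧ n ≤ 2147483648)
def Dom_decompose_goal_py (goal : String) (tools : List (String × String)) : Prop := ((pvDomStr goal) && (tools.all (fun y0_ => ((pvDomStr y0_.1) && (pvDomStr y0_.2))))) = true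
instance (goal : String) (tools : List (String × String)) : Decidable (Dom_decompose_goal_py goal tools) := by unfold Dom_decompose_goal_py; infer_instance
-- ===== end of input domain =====

-- B replaces A's seven independent substring searches by ONE left-to-right scan of the goal
-- against an inverted keyword→tag index, then emits steps by subset tests on the tag set;
-- same return value everywhere (proved below).

-- ===== PORT A =====
-- literal transliteration of _decompose_goal: a chain of conditional appends to `steps`
def decompose_goal_py (goal : String) (tools : List (String × String)) : List (List (String × String)) :=
  let goal_lower := PySem.Str.lower goal
  let steps : List (List (String × String)) := []
  let steps := if ["calculate", "compute", "+", "-", "*", "/", "sum"].any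
      (fun op => PySem.Str.isIn op goal_lower) then
    steps ++ [[("action", "use_tool"), ("tool", "calculator"), ("description", "Perform calculation")]]
  else steps
  let steps := if ["search", "find", "look up", "research"].any
      (fun word => PySem.Str.isIn word goal_lower) then
    steps ++ [[("action", "use_tool"), ("tool", "web_search"), ("description", "Search for information")]]
  else steps
  let steps := if PySem.Str.isIn "read" goal_lower && PySem.Str.isIn "file" goal_lower then
    steps ++ [[("action", "use_tool"), ("tool", "file_read"), ("description", "Read file contents")]]
  else steps
  let steps := if PySem.Str.isIn "write" goal_lower || PySem.Str.isIn "save" goal_lower then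
    steps ++ [[("action", "use_tool"), ("tool", "file_write"), ("description", "Write to file")]]
  else steps
  let steps := if ["time", "date", "when", "current"].any
      (fun word => PySem.Str.isIn word goal_lower) then
    steps ++ [[("action", "use_tool"), ("tool", "get_current_time"), ("description", "Get current time")]]
  else steps
  let steps := if PySem.Str.isIn "weather" goal_lower then
    steps ++ [[("action", "use_tool"), ("tool", "weather"), ("description", "Get weather information")]]
  else steps
  let steps := if steps = [] then
    steps ++ [[("action", "think"), ("description", "Analyze the goal and determine approach")]]
  else steps
  steps ++ [[("action", "synthesize"), ("description", "Combine results and provide final answer")]]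

-- ===== PORT B =====
-- B's inverted index: keyword → tag (Python _KEYWORD_TAGS)
def pvKeywordTags : List (String × String) :=
  [ ("calculate", "calc"), ("compute", "calc"), ("+", "calc"), ("-", "calc"),
    ("*", "calc"), ("/", "calc"), ("sum", "calc"),
    ("search", "search"), ("find", "search"), ("look up", "search"), ("research", "search"),
    ("read", "read"), ("file", "file"),
    ("write", "write"), ("save", "write"),
    ("time", "time"), ("date", "time"), ("when", "time"), ("current", "time"),
    ("weather", "weather") ]

-- B's emission table: required tag set → step (Python _TAG_STEPS)
def pvTagSteps : List (PySem.Set String × List (String × String)) :=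
  [ (["calc"], [("action", "use_tool"), ("tool", "calculator"), ("description", "Perform calculation")]),
    (["search"], [("action", "use_tool"), ("tool", "web_search"), ("description", "Search for information")]),
    (["read", "file"], [("action", "use_tool"), ("tool", "file_read"), ("description", "Read file contents")]),
    (["write"], [("action", "use_tool"), ("tool", "file_write"), ("description", "Write to file")]),
    (["time"], [("action", "use_tool"), ("tool", "get_current_time"), ("description", "Get current time")]),
    (["weather"], [("action", "use_tool"), ("tool", "weather"), ("description", "Get weather information")]) ]

-- B's scan loop: for i in range(len(gl)): for kw, tag in _KEYWORD_TAGS: if gl.startswith(kw, i): tags.add(tag)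
-- (gl.startswith(kw, i) for 0 ≤ i < len(gl) is exactly `kw <+: gl.drop i`, ported as
--  PySem.Chars.startswith (gl.drop i) kw; range(len(gl)) is List.range gl.length — indices are nonnegative)
def pvScanTags (gl : List Char) : PySem.Set String :=
  (List.range gl.length).foldl (fun tags i =>
    pvKeywordTags.foldl (fun tags kt =>
      if PySem.Chars.startswith (gl.drop i) kt.1.toList then PySem.Set.add tags kt.2 else tags) tags)
    PySem.Set.empty

-- transliteration of B: scan once, then filter the emission table by subset test, then the tail
def decompose_goal_py_alt (goal : String) (tools : List (String × String)) : List (List (String × String)) :=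
  let gl := (PySem.Str.lower goal).toList
  let tags := pvScanTags gl
  let steps := (pvTagSteps.filter (fun rs => PySem.Set.issubset rs.1 tags)).map (fun rs => rs.2)
  let steps := if steps = [] then
    steps ++ [[("action", "think"), ("description", "Analyze the goal and determine approach")]]
  else steps
  steps ++ [[("action", "synthesize"), ("description", "Combine results and provide final answer")]]

-- ===== PRECONDITION & SPEC =====
def Spec_decompose_goal_py (goal : String) (tools : List (String × String)) (out : List (List (String × String))) : Prop := out = decompose_goal_py_alt goal tools
instance (goal : String) (tools : List (String × String)) (out : List (List (String × String))) : Decidable (Spec_decompose_goal_py goal tools out) := by unfold Spec_decompose_goal_py; infer_instance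

-- ===== CLAIM =====
def Claim_equal_decompose_goal_py : Prop := ∀ (goal : String) (tools : List (String × String)), Dom_decompose_goal_py goal tools → Spec_decompose_goal_py goal tools (decompose_goal_py goal tools)

-- ===== LEMMAS AND PROOFS =====

-- membership in the inner fold over the keyword table
theorem pv_mem_inner (gl : List Char) (i : Nat) (s : PySem.Set String) (t : String) :
    t ∈ pvKeywordTags.foldl (fun tags kt =>
        if PySem.Chars.startswith (gl.drop i) kt.1.toList then PySem.Set.add tags kt.2 else tags) s ↔
      t ∈ s ∨ ∃ kt ∈ pvKeywordTags, PySem.Chars.startswith (gl.drop i) kt.1.toList = true ∧ kt.2 = t := by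
  have gen : ∀ (l : List (String × String)) (s : PySem.Set String),
      t ∈ l.foldl (fun tags kt =>
          if PySem.Chars.startswith (gl.drop i) kt.1.toList then PySem.Set.add tags kt.2 else tags) s ↔
        t ∈ s ∨ ∃ kt ∈ l, PySem.Chars.startswith (gl.drop i) kt.1.toList = true ∧ kt.2 = t := by
    intro l
    induction l with
    | nil => simp
    | cons a l ih =>
      intro s
      by_cases h : PySem.Chars.startswith (gl.drop i) a.1.toList = true
      · simp [List.foldl, h, ih, PySem.Set.mem_add]
        tauto
      · simp only [Bool.not_eq_true] at h
        simp [List.foldl, h, ih]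
  exact gen pvKeywordTags s

-- membership in the whole scan
theorem pv_mem_scan (gl : List Char) (t : String) :
    t ∈ pvScanTags gl ↔
      ∃ i < gl.length, ∃ kt ∈ pvKeywordTags,
        PySem.Chars.startswith (gl.drop i) kt.1.toList = true ∧ kt.2 = t := by
  have gen : ∀ (idxs : List Nat) (s : PySem.Set String),
      t ∈ idxs.foldl (fun tags i =>
          pvKeywordTags.foldl (fun tags kt =>
            if PySem.Chars.startswith (gl.drop i) kt.1.toList then PySem.Set.add tags kt.2 else tags) tags) s ↔
        t ∈ s ∨ ∃ i ∈ idxs, ∃ kt ∈ pvKeywordTags,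
          PySem.Chars.startswith (gl.drop i) kt.1.toList = true ∧ kt.2 = t := by
    intro idxs
    induction idxs with
    | nil => simp
    | cons a l ih =>
      intro s
      simp [List.foldl, ih, pv_mem_inner]
      exact or_assoc
  unfold pvScanTags
  rw [gen (List.range gl.length) PySem.Set.empty]
  simp [PySem.Set.empty]

-- a bounded occurrence is exactly `kw in gl` (for nonempty kw)
theorem pv_exists_lt_prefix_iff (gl kw : List Char) (h : kw ≠ []) :
    (∃ i < gl.length, kw <+: gl.drop i) ↔ PySem.Chars.isIn kw gl = true := by
  rw [← PySem.Chars.exists_prefix_drop_iff_isIn]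
  constructor
  · rintro ⟨i, _, hp⟩; exact ⟨i, hp⟩
  · rintro ⟨j, hp⟩
    by_cases hj : j < gl.length
    · exact ⟨j, hj, hp⟩
    · push_neg at hj
      rw [List.drop_eq_nil_of_le hj] at hp
      exact absurd (List.prefix_nil.mp hp) h

-- the collected tag set, characterised by substring membership
theorem pv_contains_scan (gl : List Char) (t : String) :
    (pvScanTags gl).contains t = true ↔
      ∃ kt ∈ pvKeywordTags, kt.2 = t ∧ PySem.Chars.isIn kt.1.toList gl = true := by
  rw [show (pvScanTags gl).contains t = List.contains (pvScanTags gl) t from by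
    simp [PySem.Set.contains]]
  rw [List.contains_iff_mem, pv_mem_scan]
  constructor
  · rintro ⟨i, hi, kt, hmem, hsw, ht⟩
    refine ⟨kt, hmem, ht, ?_⟩
    have hne : kt.1.toList ≠ [] := by fin_cases hmem <;> decide
    rw [← pv_exists_lt_prefix_iff gl kt.1.toList hne]
    exact ⟨i, hi, (PySem.Chars.startswith_iff _ _).mp hsw⟩
  · rintro ⟨kt, hmem, ht, hin⟩
    have hne : kt.1.toList ≠ [] := by fin_cases hmem <;> decide
    obtain ⟨i, hi, hp⟩ := (pv_exists_lt_prefix_iff gl kt.1.toList hne).mpr hin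
    exact ⟨i, hi, kt, hmem, (PySem.Chars.startswith_iff _ _).mpr hp, ht⟩

-- one tag's presence = A's keyword disjunction
theorem pv_tag_eq (gl : List Char) (t : String) (kws : List String)
    (hk : ∀ kw, (kw, t) ∈ pvKeywordTags ↔ kw ∈ kws) :
    (pvScanTags gl).contains t = kws.any (fun kw => PySem.Chars.isIn kw.toList gl) := by
  rw [Bool.eq_iff_iff, pv_contains_scan]
  simp only [List.any_eq_true]
  constructor
  · rintro ⟨kt, hmem, ht, hin⟩
    refine ⟨kt.1, (hk kt.1).mp ?_, hin⟩
    rw [← ht, Prod.mk.eta]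
    exact hmem
  · rintro ⟨kw, hkw, hin⟩
    exact ⟨(kw, t), (hk kw).mpr hkw, rfl, hin⟩

-- ===== VERDICT (by name: the statement is the Claim_ definition above) =====
theorem decompose_goal_py_spec : Claim_equal_decompose_goal_py := by
  intro goal tools _
  show decompose_goal_py goal tools = decompose_goal_py_alt goal tools
  simp only [decompose_goal_py, decompose_goal_py_alt]
  generalize PySem.Str.lower goal = gls
  have h1 := pv_tag_eq gls.toList "calc" ["calculate", "compute", "+", "-", "*", "/", "sum"]
    (by intro kw; simp [pvKeywordTags])
  have h2 := pv_tag_eq gls.toList "search" ["search", "find", "look up", "research"]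
    (by intro kw; simp [pvKeywordTags])
  have h3 := pv_tag_eq gls.toList "read" ["read"] (by intro kw; simp [pvKeywordTags])
  have h4 := pv_tag_eq gls.toList "file" ["file"] (by intro kw; simp [pvKeywordTags])
  have h5 := pv_tag_eq gls.toList "write" ["write", "save"] (by intro kw; simp [pvKeywordTags])
  have h6 := pv_tag_eq gls.toList "time" ["time", "date", "when", "current"]
    (by intro kw; simp [pvKeywordTags])
  have h7 := pv_tag_eq gls.toList "weather" ["weather"] (by intro kw; simp [pvKeywordTags])
  have e1 : PySem.Set.issubset ["calc"] (pvScanTags gls.toList) =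
      ["calculate", "compute", "+", "-", "*", "/", "sum"].any (fun op => PySem.Str.isIn op gls) := by
    simp only [PySem.Set.issubset, List.all_cons, List.all_nil, Bool.and_true]
    rw [h1]; simp [PySem.Str.isIn_eq]
  have e2 : PySem.Set.issubset ["search"] (pvScanTags gls.toList) =
      ["search", "find", "look up", "research"].any (fun word => PySem.Str.isIn word gls) := by
    simp only [PySem.Set.issubset, List.all_cons, List.all_nil, Bool.and_true]
    rw [h2]; simp [PySem.Str.isIn_eq]
  have e3 : PySem.Set.issubset ["read", "file"] (pvScanTags gls.toList) =
      (PySem.Str.isIn "read" gls && PySem.Str.isIn "file" gls) := by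
    simp only [PySem.Set.issubset, List.all_cons, List.all_nil, Bool.and_true]
    rw [h3, h4]; simp [PySem.Str.isIn_eq]
  have e4 : PySem.Set.issubset ["write"] (pvScanTags gls.toList) =
      (PySem.Str.isIn "write" gls || PySem.Str.isIn "save" gls) := by
    simp only [PySem.Set.issubset, List.all_cons, List.all_nil, Bool.and_true]
    rw [h5]; simp [PySem.Str.isIn_eq]
  have e5 : PySem.Set.issubset ["time"] (pvScanTags gls.toList) =
      ["time", "date", "when", "current"].any (fun word => PySem.Str.isIn word gls) := by
    simp only [PySem.Set.issubset, List.all_cons, List.all_nil, Bool.and_true]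
    rw [h6]; simp [PySem.Str.isIn_eq]
  have e6 : PySem.Set.issubset ["weather"] (pvScanTags gls.toList) =
      PySem.Str.isIn "weather" gls := by
    simp only [PySem.Set.issubset, List.all_cons, List.all_nil, Bool.and_true]
    rw [h7]; simp [PySem.Str.isIn_eq]
  simp only [pvTagSteps, List.filter_cons, List.filter_nil, e1, e2, e3, e4, e5, e6]
  cases ha1 : ["calculate", "compute", "+", "-", "*", "/", "sum"].any (fun op => PySem.Str.isIn op gls) <;>
  cases ha2 : ["search", "find", "look up", "research"].any (fun word => PySem.Str.isIn word gls) <;>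
  cases ha3 : (PySem.Str.isIn "read" gls && PySem.Str.isIn "file" gls) <;>
  cases ha4 : (PySem.Str.isIn "write" gls || PySem.Str.isIn "save" gls) <;>
  cases ha5 : ["time", "date", "when", "current"].any (fun word => PySem.Str.isIn word gls) <;>
  cases ha6 : PySem.Str.isIn "weather" gls <;>
    simp [ha1, ha2, ha3, ha4, ha5, ha6]
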